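-- pv_equiv track=rewrite | github.com/comp110-lytle/comp110 | zzz/fa24/code/admin/gradebook/helpers.py | assignment_versions
-- ===== SOURCE A (Python) =====
-- def assignment_versions(titles: list[str]) -> dict[str, list[str]]:
--     """
--     Given a list of titles of all assignments, look for same prefix (e.g. FN00) and build up a list of all assignments
--     with the same prefix. This is useful because for assignments with multiple versions (e.g. FN00 - A, FN00 - B) we
--     will want all titles various versions grouped together.
--     """
--     versions: dict[str, list[str]] = {}
--     for title in titles:
--         prefix = title[0:4]
--         if prefix in versions:
--             versions[prefix].append(title)
--         else:
--             versions[prefix] = [title]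
--     return versions
-- ===== SOURCE B (Python) =====
-- def assignment_versions(titles: list[str]) -> dict[str, list[str]]:
--     """
--     Group assignment titles by their 4-character prefix: distinct prefixes in
--     first-appearance order, each mapped to the titles carrying it, in input order.
--     """
--     prefixes = dict.fromkeys(title[0:4] for title in titles)
--     return {p: [t for t in titles if t[0:4] == p] for p in prefixes}
-- ===== Notes on version B (the rewrite author's own statement) =====
-- stated objective: idiomatic
-- what changed: A's single pass maintaining a dict of growing lists is replaced by a distinct-prefix pass (dict.fromkeys) followed by a per-prefix filter comprehension over the full title list.
import Mathlib
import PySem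

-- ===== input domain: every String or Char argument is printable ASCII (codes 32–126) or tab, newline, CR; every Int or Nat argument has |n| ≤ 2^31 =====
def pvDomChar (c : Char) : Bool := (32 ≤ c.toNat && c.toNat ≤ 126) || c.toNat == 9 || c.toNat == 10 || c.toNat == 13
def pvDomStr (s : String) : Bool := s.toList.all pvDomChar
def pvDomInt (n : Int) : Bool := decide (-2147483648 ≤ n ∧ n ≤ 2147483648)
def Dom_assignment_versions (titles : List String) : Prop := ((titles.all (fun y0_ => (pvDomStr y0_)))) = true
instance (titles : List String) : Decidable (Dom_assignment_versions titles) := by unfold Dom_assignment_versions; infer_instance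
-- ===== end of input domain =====

-- B replaces A's single grouping pass over a dict of lists by a distinct-prefix pass (dict.fromkeys) plus a per-prefix filter comprehension; same output, no speed claim.
-- ===== PORT A =====
def assignment_versions (titles : List String) : List (String × List String) :=
  (titles.foldl
    (fun versions title =>
      let pfx := PySem.Str.slice title (some 0) (some 4)
      if versions.contains pfx then
        versions.modify pfx [] (fun lst => lst ++ [title])
      else
        versions.insert pfx [title])
    PySem.Dict.empty).items

-- ===== PORT B =====
def assignment_versions_alt (titles : List String) : List (String × List String) :=
  let prefixes := PySem.List.dedup (titles.map (fun title => PySem.Str.slice title (some 0) (some 4)))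
  prefixes.map (fun p => (p, titles.filter (fun t => PySem.Str.slice t (some 0) (some 4) == p)))

-- ===== PRECONDITION & SPEC =====
def Spec_assignment_versions (titles : List String) (out : List (String × List String)) : Prop := out = assignment_versions_alt titles
instance (titles : List String) (out : List (String × List String)) : Decidable (Spec_assignment_versions titles out) := by unfold Spec_assignment_versions; infer_instance

-- ===== CLAIM (what is proved, stated in full; the proofs are below) =====
def Claim_equal_assignment_versions : Prop := ∀ (titles : List String), Dom_assignment_versions titles → Spec_assignment_versions titles (assignment_versions titles)

-- ===== LEMMAS AND PROOFS =====

-- A's branching step is exactly Dict.modify (modify inserts missing keys with f dflt)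
lemma av_step_eq (d : PySem.Dict String (List String)) (title : String) :
    (let pfx := PySem.Str.slice title (some 0) (some 4)
     if d.contains pfx then d.modify pfx [] (fun lst => lst ++ [title])
     else d.insert pfx [title])
    = d.modify (PySem.Str.slice title (some 0) (some 4)) [] (fun lst => lst ++ [title]) := by
  by_cases h : d.contains (PySem.Str.slice title (some 0) (some 4))
  · simp [h]
  · simp only [Bool.not_eq_true] at h
    simp [h, PySem.Dict.modify, PySem.Dict.getD_of_not_contains d [] h]

lemma av_main (titles : List String) :
    assignment_versions titles = assignment_versions_alt titles := by
  unfold assignment_versions assignment_versions_alt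
  simp only [av_step_eq]
  have hmap : titles.foldl
      (fun d title => d.modify (PySem.Str.slice title (some 0) (some 4)) [] (fun lst => lst ++ [title]))
      PySem.Dict.empty
      = (titles.map (fun t => (PySem.Str.slice t (some 0) (some 4), t))).foldl
          (fun d p => d.modify p.1 [] (fun lst => lst ++ [p.2])) PySem.Dict.empty := by
    rw [List.foldl_map]
  rw [hmap]
  set l := titles.map (fun t => (PySem.Str.slice t (some 0) (some 4), t)) with hl
  set d := l.foldl (fun d p => d.modify p.1 [] (fun lst => lst ++ [p.2])) PySem.Dict.empty with hd
  have hkeys : d.keys = PySem.List.dedup (titles.map (fun t => PySem.Str.slice t (some 0) (some 4))) := by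
    rw [hd, PySem.Dict.keys_foldl_modify_key l (fun p => p.1) [] (fun _ p => (fun lst => lst ++ [p.2]))]
    simp [hl, PySem.Set.update, PySem.Set.ofList_eq_foldl, List.map_map, Function.comp_def]
  have hnd : d.keys.Nodup := by
    rw [hkeys]; exact PySem.List.nodup_dedup _
  have hgetD : ∀ c, d.getD c [] = titles.filter (fun t => PySem.Str.slice t (some 0) (some 4) == c) := by
    intro c
    rw [hd, PySem.Dict.getD_foldl_modify_append l PySem.Dict.empty c]
    simp [hl, List.filter_map, List.map_map, Function.comp_def]
  rw [PySem.Dict.items_eq_map_keys d hnd [], hkeys]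
  exact List.map_congr_left (fun p _ => by rw [hgetD p])

-- ===== VERDICT (by name: the statement is the Claim_ definition above) =====
theorem assignment_versions_spec : Claim_equal_assignment_versions := by
  intro titles _
  unfold Spec_assignment_versions
  exact av_main titles
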